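-- pv_equiv track=rewrite | github.com/slaythrax/clamui | src/core/threat_classifier.py | categorize_threat
-- ===== SOURCE A (Python) =====
-- from typing import List, Tuple
--
-- HIGH_PRIORITY_CATEGORY_PATTERNS: List[Tuple[str, str]] = [
--     ('ransomware', 'Ransomware'),
--     ('ransom', 'Ransomware'),
--     ('rootkit', 'Rootkit'),
--     ('bootkit', 'Rootkit'),
--     ('trojan', 'Trojan'),
--     ('worm', 'Worm'),
--     ('backdoor', 'Backdoor'),
--     ('exploit', 'Exploit'),
--     ('adware', 'Adware'),
--     ('spyware', 'Spyware'),
--     ('keylogger', 'Spyware'),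
--     ('eicar', 'Test'),
--     ('test-signature', 'Test'),
--     ('test.file', 'Test'),
--     ('macro', 'Macro'),
--     ('phish', 'Phishing'),
--     ('heuristic', 'Heuristic'),
-- ]
--
-- LOW_PRIORITY_CATEGORY_PATTERNS: List[Tuple[str, str]] = [
--     ('pua', 'PUA'),
--     ('pup', 'PUA'),
--     ('virus', 'Virus'),
-- ]
--
-- def categorize_threat(threat_name: str) -> str:
--     """
--     Extract the category of a threat from its name.
--
--     ClamAV threat names typically follow patterns like:
--     - "Win.Trojan.Agent" -> "Trojan"
--     - "Eicar-Test-Signature" -> "Test"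
--     - "PUA.Win.Adware.Generic" -> "Adware"
--
--     The function uses two-tier matching:
--     1. First, check high-priority patterns (specific threat types like Adware)
--     2. Only if no high-priority match, check low-priority patterns (generic like PUA)
--     Within each tier, position-based matching is used: when multiple category
--     keywords are present, the one appearing earliest in the threat name wins.
--
--     Categories returned:
--     - Ransomware: Ransomware, CryptoLocker variants
--     - Rootkit: Rootkits and bootkits
--     - Trojan: Trojan horse malware
--     - Worm: Self-replicating worms
--     - Backdoor: Backdoor access tools
--     - Exploit: Vulnerability exploits
--     - Adware: Advertising software
--     - Spyware: Spyware and keyloggers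
--     - PUA: Potentially Unwanted Applications
--     - Test: Test signatures (EICAR)
--     - Virus: Generic viruses
--     - Macro: Macro viruses
--     - Phishing: Phishing attempts
--     - Heuristic: Heuristic detections
--
--     Args:
--         threat_name: The threat name from ClamAV output
--
--     Returns:
--         Category as string (e.g., 'Virus', 'Trojan', 'Worm', etc.)
--
--     Example:
--         >>> categorize_threat("Win.Trojan.Agent")
--         'Trojan'
--
--         >>> categorize_threat("Eicar-Test-Signature")
--         'Test'
--     """
--     if not threat_name:
--         return "Unknown"
--
--     name_lower = threat_name.lower()
--
--     # First, check high-priority patterns by position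
--     matches = []
--     for pattern, category in HIGH_PRIORITY_CATEGORY_PATTERNS:
--         pos = name_lower.find(pattern)
--         if pos != -1:
--             matches.append((pos, category))
--
--     if matches:
--         matches.sort(key=lambda x: x[0])
--         return matches[0][1]
--
--     # If no high-priority match, check low-priority patterns
--     for pattern, category in LOW_PRIORITY_CATEGORY_PATTERNS:
--         pos = name_lower.find(pattern)
--         if pos != -1:
--             matches.append((pos, category))
--
--     if matches:
--         matches.sort(key=lambda x: x[0])
--         return matches[0][1]
--
--     # Default to "Virus" for unrecognized threats (conservative assumption)
--     return "Virus"
-- ===== SOURCE B (Python) =====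
-- from typing import List, Optional, Tuple
--
-- HIGH_PRIORITY_CATEGORY_PATTERNS: List[Tuple[str, str]] = [
--     ('ransomware', 'Ransomware'),
--     ('ransom', 'Ransomware'),
--     ('rootkit', 'Rootkit'),
--     ('bootkit', 'Rootkit'),
--     ('trojan', 'Trojan'),
--     ('worm', 'Worm'),
--     ('backdoor', 'Backdoor'),
--     ('exploit', 'Exploit'),
--     ('adware', 'Adware'),
--     ('spyware', 'Spyware'),
--     ('keylogger', 'Spyware'),
--     ('eicar', 'Test'),
--     ('test-signature', 'Test'),
--     ('test.file', 'Test'),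
--     ('macro', 'Macro'),
--     ('phish', 'Phishing'),
--     ('heuristic', 'Heuristic'),
-- ]
--
-- LOW_PRIORITY_CATEGORY_PATTERNS: List[Tuple[str, str]] = [
--     ('pua', 'PUA'),
--     ('pup', 'PUA'),
--     ('virus', 'Virus'),
-- ]
--
--
-- def _scan(name_lower: str, patterns: List[Tuple[str, str]]) -> Optional[str]:
--     """Positional scan: at each index, try the patterns in declared order."""
--     for i in range(len(name_lower)):
--         for pattern, category in patterns:
--             if name_lower.startswith(pattern, i):
--                 return category
--     return None
--
--
-- def categorize_threat(threat_name: str) -> str: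
--     if not threat_name:
--         return "Unknown"
--     name_lower = threat_name.lower()
--     result = _scan(name_lower, HIGH_PRIORITY_CATEGORY_PATTERNS)
--     if result is None:
--         result = _scan(name_lower, LOW_PRIORITY_CATEGORY_PATTERNS)
--     return result if result is not None else "Virus"
-- ===== Notes on version B (the rewrite author's own statement) =====
-- stated objective: alternative
-- what changed: Replaces per-pattern find + collect + stable sort + take-head with a single left-to-right positional scan that checks the patterns in declared order at each index and returns on the first hit, tier by tier.
import Mathlib
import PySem

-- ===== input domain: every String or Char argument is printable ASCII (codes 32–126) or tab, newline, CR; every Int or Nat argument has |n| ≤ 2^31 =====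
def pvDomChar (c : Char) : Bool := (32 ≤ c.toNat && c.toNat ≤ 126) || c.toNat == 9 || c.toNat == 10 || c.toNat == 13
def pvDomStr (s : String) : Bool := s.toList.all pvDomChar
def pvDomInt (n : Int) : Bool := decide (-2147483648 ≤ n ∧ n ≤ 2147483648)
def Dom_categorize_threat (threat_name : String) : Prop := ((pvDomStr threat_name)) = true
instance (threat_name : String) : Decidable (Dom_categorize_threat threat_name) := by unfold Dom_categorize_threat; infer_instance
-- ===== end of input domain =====

-- B replaces A's find+collect+stable-sort with a tier-by-tier positional scan returning on the
-- first pattern hit (patterns tried in declared order at each index); same result, no sort (objective: alternative).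

-- module-level constants shared by both ports
def HIGH_PRIORITY_CATEGORY_PATTERNS : List (String × String) :=
  [("ransomware", "Ransomware"), ("ransom", "Ransomware"), ("rootkit", "Rootkit"),
   ("bootkit", "Rootkit"), ("trojan", "Trojan"), ("worm", "Worm"), ("backdoor", "Backdoor"),
   ("exploit", "Exploit"), ("adware", "Adware"), ("spyware", "Spyware"), ("keylogger", "Spyware"),
   ("eicar", "Test"), ("test-signature", "Test"), ("test.file", "Test"), ("macro", "Macro"),
   ("phish", "Phishing"), ("heuristic", "Heuristic")]

def LOW_PRIORITY_CATEGORY_PATTERNS : List (String × String) :=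
  [("pua", "PUA"), ("pup", "PUA"), ("virus", "Virus")]

-- ===== PORT A =====
def categorize_threat (threat_name : String) : String :=
  if threat_name = "" then "Unknown"
  else
    let name_lower := PySem.Str.lower threat_name
    let matches_ : List (Int × String) :=
      HIGH_PRIORITY_CATEGORY_PATTERNS.foldl (fun acc pc =>
        let pos := PySem.Str.find name_lower pc.1
        if pos ≠ -1 then acc ++ [(pos, pc.2)] else acc) []
    if matches_ ≠ [] then
      -- matches.sort(key=λx. x[0]) (stable); return matches[0][1]
      ((PySem.List.sorted matches_ (fun x => x.1) false).headI).2
    else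
      let matches2 : List (Int × String) :=
        LOW_PRIORITY_CATEGORY_PATTERNS.foldl (fun acc pc =>
          let pos := PySem.Str.find name_lower pc.1
          if pos ≠ -1 then acc ++ [(pos, pc.2)] else acc) matches_
      if matches2 ≠ [] then
        ((PySem.List.sorted matches2 (fun x => x.1) false).headI).2
      else "Virus"

-- ===== PORT B =====
-- inner loop: try the patterns in declared order at the current position
def pvCheck (s : List Char) : List (String × String) → Option String
  | [] => none
  | pc :: rest =>
      -- name_lower.startswith(pattern, i): exact for 0 ≤ i ≤ len as prefix of the drop
      if PySem.Chars.startswith s pc.1.toList then some pc.2 else pvCheck s rest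

-- outer loop of _scan: for i in range(len(name_lower)):
def pvScan (t : List Char) (pats : List (String × String)) : List Nat → Option String
  | [] => none
  | i :: is =>
      match pvCheck (t.drop i) pats with
      | some c => some c
      | none => pvScan t pats is

def categorize_threat_alt (threat_name : String) : String :=
  if threat_name = "" then "Unknown"
  else
    let t := PySem.Chars.lower threat_name.toList
    let result := pvScan t HIGH_PRIORITY_CATEGORY_PATTERNS (List.range t.length)
    let result2 :=
      match result with
      | none => pvScan t LOW_PRIORITY_CATEGORY_PATTERNS (List.range t.length)
      | some c => some c
    match result2 with
    | some c => c
    | none => "Virus"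

-- ===== PRECONDITION & SPEC =====
def Spec_categorize_threat (threat_name : String) (out : String) : Prop := out = categorize_threat_alt threat_name
instance (threat_name : String) (out : String) : Decidable (Spec_categorize_threat threat_name out) := by unfold Spec_categorize_threat; infer_instance

-- ===== CLAIM (what is proved, stated in full; the proofs are below) =====
def Claim_equal_categorize_threat : Prop := ∀ (threat_name : String), Dom_categorize_threat threat_name → Spec_categorize_threat threat_name (categorize_threat threat_name)

-- ===== LEMMAS AND PROOFS =====

-- A's collected matches list as filter-then-map
def pvAM (t : List Char) (pats : List (String × String)) : List (Int × String) :=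
  (pats.filter (fun pc => decide (PySem.Chars.find t pc.1.toList ≠ -1))).map
    (fun pc => (PySem.Chars.find t pc.1.toList, pc.2))

lemma pvFoldl_matches_eq (nl : String) (pats : List (String × String)) (acc : List (Int × String)) :
    pats.foldl (fun acc pc =>
        let pos := PySem.Str.find nl pc.1
        if pos ≠ -1 then acc ++ [(pos, pc.2)] else acc) acc
      = acc ++ pvAM nl.toList pats := by
  induction pats generalizing acc with
  | nil => simp [pvAM]
  | cons pc rest ih =>
    rw [List.foldl_cons, ih]
    by_cases hc : PySem.Chars.find nl.toList pc.1.toList ≠ -1 <;>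
      simp [pvAM, hc, PySem.Str.find_eq, List.append_assoc]

lemma pvMem_pvAM (t : List Char) (pats : List (String × String)) (x : Int × String) :
    x ∈ pvAM t pats ↔ ∃ pc ∈ pats, PySem.Chars.find t pc.1.toList ≠ -1 ∧
      x = (PySem.Chars.find t pc.1.toList, pc.2) := by
  constructor
  · intro hx
    simp only [pvAM, List.mem_map, List.mem_filter, decide_eq_true_eq] at hx
    obtain ⟨pc, ⟨hpc, hne⟩, hx⟩ := hx
    exact ⟨pc, hpc, hne, hx.symm⟩
  · intro ⟨pc, hpc, hne, hx⟩
    simp only [pvAM, List.mem_map, List.mem_filter, decide_eq_true_eq]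
    exact ⟨pc, ⟨hpc, hne⟩, hx.symm⟩

-- first element attaining the minimal key (what Python's stable sort + [0] computes)
def pvCombine (b : Option (Int × String)) (x : Int × String) : Option (Int × String) :=
  match b with
  | none => some x
  | some bb => if x.1 < bb.1 then some x else some bb

lemma pvHead_insertBy (f : Int × String → Int × String → Bool) (x : Int × String)
    (ys : List (Int × String)) :
    (PySem.List.insertBy f x ys).head? =
      some (match ys with | [] => x | y :: _ => if f x y then x else y) := by
  cases ys with
  | nil => rfl
  | cons y ys => cases hf : f x y <;> simp [PySem.List.insertBy, hf]

lemma pvHead_foldl_insertBy (M acc : List (Int × String)) :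
    (M.foldl (fun acc x => PySem.List.insertBy (fun a b => decide (a.1 < b.1)) x acc) acc).head?
      = M.foldl pvCombine acc.head? := by
  induction M generalizing acc with
  | nil => rfl
  | cons x M ih =>
    rw [List.foldl_cons, ih, List.foldl_cons]
    congr 1
    rw [pvHead_insertBy]
    cases acc with
    | nil => rfl
    | cons y ys =>
      by_cases hxy : x.1 < y.1 <;> simp [pvCombine, hxy]

lemma pvHead_sorted (M : List (Int × String)) :
    (PySem.List.sorted M (fun x => x.1) false).head? = M.foldl pvCombine none := by
  rw [PySem.List.sorted_eq_foldl_insertBy]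
  simpa using pvHead_foldl_insertBy M []

lemma pvKeep (M : List (Int × String)) (b : Int × String) (h : ∀ x ∈ M, b.1 ≤ x.1) :
    M.foldl pvCombine (some b) = some b := by
  induction M with
  | nil => rfl
  | cons x M ih =>
    rw [List.foldl_cons]
    have hx : ¬ x.1 < b.1 := not_lt.2 (h x (List.mem_cons_self ..))
    simp only [pvCombine, if_neg hx]
    exact ih (fun y hy => h y (List.mem_cons_of_mem _ hy))

lemma pvAuxStrict (M : List (Int × String)) (m : Int) (x0 : Int × String)
    (hlb : ∀ x ∈ M, m ≤ x.1) (hf : M.find? (fun x => decide (x.1 = m)) = some x0) :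
    ∀ b : Int × String, m < b.1 → M.foldl pvCombine (some b) = some x0 := by
  induction M generalizing x0 with
  | nil => simp at hf
  | cons y M ih =>
    intro b hb
    by_cases hy : y.1 = m
    · rw [List.find?_cons_of_pos (h := by simp [hy])] at hf
      injection hf with hf; subst hf
      rw [List.foldl_cons]
      have : y.1 < b.1 := by omega
      simp only [pvCombine, if_pos this]
      exact pvKeep M y (fun x hx => by have := hlb x (List.mem_cons_of_mem _ hx); omega)
    · rw [List.find?_cons_of_neg (h := by simp [hy])] at hf
      have hym : m < y.1 := lt_of_le_of_ne (hlb y (List.mem_cons_self ..)) (Ne.symm hy)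
      rw [List.foldl_cons]
      have hlb' : ∀ x ∈ M, m ≤ x.1 := fun x hx => hlb x (List.mem_cons_of_mem _ hx)
      by_cases hyb : y.1 < b.1
      · simp only [pvCombine, if_pos hyb]
        exact ih x0 hlb' hf y hym
      · simp only [pvCombine, if_neg hyb]
        exact ih x0 hlb' hf b hb

lemma pvFirstMin_eq (M : List (Int × String)) (m : Int) (x0 : Int × String)
    (hlb : ∀ x ∈ M, m ≤ x.1) (hf : M.find? (fun x => decide (x.1 = m)) = some x0) :
    M.foldl pvCombine none = some x0 := by
  cases M with
  | nil => simp at hf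
  | cons y M =>
    rw [List.foldl_cons]
    show M.foldl pvCombine (some y) = some x0
    by_cases hy : y.1 = m
    · rw [List.find?_cons_of_pos (h := by simp [hy])] at hf
      injection hf with hf; subst hf
      exact pvKeep M y (fun x hx => by have := hlb x (List.mem_cons_of_mem _ hx); omega)
    · rw [List.find?_cons_of_neg (h := by simp [hy])] at hf
      have hym : m < y.1 := lt_of_le_of_ne (hlb y (List.mem_cons_self ..)) (Ne.symm hy)
      exact pvAuxStrict M m x0 (fun x hx => hlb x (List.mem_cons_of_mem _ hx)) hf y hym

lemma pvCheck_none_iff (s : List Char) (pats : List (String × String)) :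
    pvCheck s pats = none ↔ ∀ pc ∈ pats, ¬ pc.1.toList <+: s := by
  induction pats with
  | nil => simp [pvCheck]
  | cons pc rest ih =>
    cases hs : PySem.Chars.startswith s pc.1.toList with
    | true =>
      simp only [pvCheck, hs, if_true]
      constructor
      · intro h; exact absurd h (by simp)
      · intro h; exact absurd ((PySem.Chars.startswith_iff _ _).1 hs) (h pc (List.mem_cons_self ..))
    | false =>
      simp only [pvCheck, hs, Bool.false_eq_true, if_false, ih]
      constructor
      · intro h pc' hpc'
        rcases List.mem_cons.1 hpc' with h1 | h1
        · subst h1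
          intro hp
          exact absurd ((PySem.Chars.startswith_iff _ _).2 hp) (by simp [hs])
        · exact h pc' h1
      · intro h pc' hpc'
        exact h pc' (List.mem_cons_of_mem _ hpc')

lemma pvScan_skip (t : List Char) (pats : List (String × String)) (is₁ is₂ : List Nat)
    (h : ∀ i ∈ is₁, pvCheck (t.drop i) pats = none) :
    pvScan t pats (is₁ ++ is₂) = pvScan t pats is₂ := by
  induction is₁ with
  | nil => simp
  | cons i is₁ ih =>
    rw [List.cons_append]
    show (match pvCheck (t.drop i) pats with
      | some c => some c
      | none => pvScan t pats (is₁ ++ is₂)) = pvScan t pats is₂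
    rw [h i (List.mem_cons_self ..)]
    exact ih (fun j hj => h j (List.mem_cons_of_mem _ hj))

lemma pvScan_none (t : List Char) (pats : List (String × String)) (is : List Nat)
    (h : ∀ i ∈ is, pvCheck (t.drop i) pats = none) :
    pvScan t pats is = none := by
  induction is with
  | nil => rfl
  | cons i is ih =>
    show (match pvCheck (t.drop i) pats with
      | some c => some c
      | none => pvScan t pats is) = none
    rw [h i (List.mem_cons_self ..)]
    exact ih (fun j hj => h j (List.mem_cons_of_mem _ hj))

lemma pvBridge (t : List Char) (i0 : Nat) (pats : List (String × String))
    (h : ∀ pc ∈ pats, (pc.1.toList <+: t.drop i0 ↔ PySem.Chars.find t pc.1.toList = (i0 : Int))) :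
    ((pvAM t pats).find? (fun x => decide (x.1 = (i0 : Int)))).map (·.2)
      = pvCheck (t.drop i0) pats := by
  induction pats with
  | nil => simp [pvAM, pvCheck]
  | cons pc rest ih =>
    have hpc := h pc (List.mem_cons_self ..)
    have hrest : ∀ pc' ∈ rest, (pc'.1.toList <+: t.drop i0 ↔
        PySem.Chars.find t pc'.1.toList = (i0 : Int)) :=
      fun pc' hpc' => h pc' (List.mem_cons_of_mem _ hpc')
    by_cases hs : pc.1.toList <+: t.drop i0
    · have hf : PySem.Chars.find t pc.1.toList = (i0 : Int) := hpc.1 hs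
      have hne1 : ¬ PySem.Chars.find t pc.1.toList = -1 := by rw [hf]; omega
      have hAM : pvAM t (pc :: rest) =
          (PySem.Chars.find t pc.1.toList, pc.2) :: pvAM t rest := by
        simp [pvAM, hne1]
      rw [hAM, List.find?_cons_of_pos (h := by simp [hf])]
      simp [pvCheck, (PySem.Chars.startswith_iff _ _).2 hs]
    · have hsw : ¬ PySem.Chars.startswith (t.drop i0) pc.1.toList = true :=
        fun hx => hs ((PySem.Chars.startswith_iff _ _).1 hx)
      have hCk : pvCheck (t.drop i0) (pc :: rest) = pvCheck (t.drop i0) rest := by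
        simp [pvCheck, hsw]
      rw [hCk]
      by_cases hcf : PySem.Chars.find t pc.1.toList = -1
      · have hAM : pvAM t (pc :: rest) = pvAM t rest := by
          simp [pvAM, hcf]
        rw [hAM]; exact ih hrest
      · have hfne : ¬ PySem.Chars.find t pc.1.toList = (i0 : Int) :=
          fun he => hs (hpc.2 he)
        have hAM : pvAM t (pc :: rest) =
            (PySem.Chars.find t pc.1.toList, pc.2) :: pvAM t rest := by
          simp [pvAM, hcf]
        rw [hAM, List.find?_cons_of_neg (h := by simp [hfne])]
        exact ih hrest

-- the per-tier equivalence: stable-sort head = positional scan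
theorem pvTier_eq (t : List Char) (pats : List (String × String))
    (hne : ∀ pc ∈ pats, pc.1.toList ≠ []) :
    ((PySem.List.sorted (pvAM t pats) (fun x => x.1) false).head?).map (·.2)
      = pvScan t pats (List.range t.length) := by
  by_cases hex : ∃ i, ∃ pc ∈ pats, pc.1.toList <+: t.drop i
  · haveI : DecidablePred (fun i => ∃ pc ∈ pats, pc.1.toList <+: t.drop i) :=
      fun _ => Classical.dec _
    set i0 := Nat.find hex
    have hhit : ∃ pc ∈ pats, pc.1.toList <+: t.drop i0 := Nat.find_spec hex
    have hmin : ∀ j < i0, ¬ ∃ pc ∈ pats, pc.1.toList <+: t.drop j :=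
      fun j hj => Nat.find_min hex hj
    -- each pattern matches at i0 iff its find equals i0
    have hiff : ∀ pc ∈ pats, (pc.1.toList <+: t.drop i0 ↔
        PySem.Chars.find t pc.1.toList = (i0 : Int)) := by
      intro pc hpc
      constructor
      · intro hp
        have hinf : pc.1.toList <:+: t :=
          hp.isInfix.trans (List.drop_suffix i0 t).isInfix
        have h0 : 0 ≤ PySem.Chars.find t pc.1.toList :=
          (PySem.Chars.find_nonneg_iff _ _).2 hinf
        obtain ⟨hp0, hmin0⟩ := PySem.Chars.find_spec h0
        have h1 : i0 ≤ (PySem.Chars.find t pc.1.toList).toNat := by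
          by_contra hlt
          rw [Nat.not_le] at hlt
          exact hmin _ hlt ⟨pc, hpc, hp0⟩
        have h2 : ¬ i0 < (PySem.Chars.find t pc.1.toList).toNat :=
          fun hlt => hmin0 i0 hlt hp
        have h3 : (PySem.Chars.find t pc.1.toList).toNat = i0 := by omega
        rw [← Int.toNat_of_nonneg h0, h3]
      · intro hf
        have h0 : 0 ≤ PySem.Chars.find t pc.1.toList := by rw [hf]; omega
        have := (PySem.Chars.find_spec h0).1
        rw [hf] at this
        simpa using this
    -- every collected find is ≥ i0
    have hge : ∀ x ∈ pvAM t pats, (i0 : Int) ≤ x.1 := by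
      intro x hx
      obtain ⟨pc, hpc, hne1, hxeq⟩ := (pvMem_pvAM t pats x).1 hx
      have hinf : pc.1.toList <:+: t := (PySem.Chars.find_ne_neg_one_iff _ _).1 hne1
      have h0 : 0 ≤ PySem.Chars.find t pc.1.toList :=
        (PySem.Chars.find_nonneg_iff _ _).2 hinf
      obtain ⟨hp0, _⟩ := PySem.Chars.find_spec h0
      have h1 : i0 ≤ (PySem.Chars.find t pc.1.toList).toNat := by
        by_contra hlt
        rw [Nat.not_le] at hlt
        exact hmin _ hlt ⟨pc, hpc, hp0⟩
      subst hxeq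
      omega
    have hi0len : i0 < t.length := by
      obtain ⟨pc, hpc, hp⟩ := hhit
      by_contra hge'
      rw [not_lt] at hge'
      rw [List.drop_eq_nil_of_le hge'] at hp
      exact hne pc hpc (List.prefix_nil.1 hp)
    obtain ⟨c, hc⟩ : ∃ c, pvCheck (t.drop i0) pats = some c := by
      cases hck : pvCheck (t.drop i0) pats with
      | some c => exact ⟨c, rfl⟩
      | none =>
        obtain ⟨pc, hpc, hp⟩ := hhit
        exact absurd hp ((pvCheck_none_iff _ _).1 hck pc hpc)
    -- B side: the scan stops exactly at i0
    have hBr : pvScan t pats (List.range t.length) = some c := by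
      have hsplit : List.range t.length =
          List.range i0 ++ List.map (fun x => i0 + x) (List.range (t.length - i0)) := by
        have h := List.range_add (n := i0) (m := t.length - i0)
        rw [show i0 + (t.length - i0) = t.length from by omega] at h
        exact h
      obtain ⟨k, hk⟩ : ∃ k, t.length - i0 = k + 1 := ⟨t.length - i0 - 1, by omega⟩
      rw [hsplit, pvScan_skip _ _ _ _ (by
        intro i hi
        rw [List.mem_range] at hi
        exact (pvCheck_none_iff _ _).2
          (fun pc hpc hp => hmin i hi ⟨pc, hpc, hp⟩))]
      rw [hk, List.range_succ_eq_map, List.map_cons]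
      show (match pvCheck (t.drop (i0 + 0)) pats with
        | some c => some c
        | none => pvScan t pats (List.map (fun x => i0 + x) (List.map Nat.succ (List.range k)))) = some c
      rw [show i0 + 0 = i0 from rfl, hc]
    -- A side: stable-sort head is the first pattern matching at i0
    obtain ⟨x0, hfind, hx0⟩ : ∃ x0,
        (pvAM t pats).find? (fun x => decide (x.1 = (i0 : Int))) = some x0 ∧ x0.2 = c := by
      have h := pvBridge t i0 pats hiff
      rw [hc] at h
      exact Option.map_eq_some_iff.1 h
    rw [hBr, pvHead_sorted, pvFirstMin_eq (pvAM t pats) (i0 : Int) x0 hge hfind]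
    simp [hx0]
  · simp only [not_exists, not_and] at hex
    have hall : ∀ pc ∈ pats, PySem.Chars.find t pc.1.toList = -1 := by
      intro pc hpc
      by_contra hne1
      have hinf : pc.1.toList <:+: t := (PySem.Chars.find_ne_neg_one_iff _ _).1 hne1
      have h0 : 0 ≤ PySem.Chars.find t pc.1.toList :=
        (PySem.Chars.find_nonneg_iff _ _).2 hinf
      obtain ⟨hp0, _⟩ := PySem.Chars.find_spec h0
      exact hex _ pc hpc hp0
    have hAM : pvAM t pats = [] := by
      simp only [pvAM, List.map_eq_nil_iff, List.filter_eq_nil_iff]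
      intro pc hpc
      simp [hall pc hpc]
    rw [hAM, pvScan_none _ _ _ (by
      intro i _
      exact (pvCheck_none_iff _ _).2 (fun pc hpc hp => hex i pc hpc hp))]
    simp [PySem.List.sorted]

theorem pvMain (s : String) : categorize_threat s = categorize_threat_alt s := by
  by_cases hs : s = ""
  · simp [categorize_threat, categorize_threat_alt, hs]
  · have hH := pvTier_eq (PySem.Str.lower s).toList HIGH_PRIORITY_CATEGORY_PATTERNS (by decide)
    have hL := pvTier_eq (PySem.Str.lower s).toList LOW_PRIORITY_CATEGORY_PATTERNS (by decide)
    simp only [categorize_threat, categorize_threat_alt, if_neg hs,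
      pvFoldl_matches_eq, List.nil_append, ← PySem.Str.toList_lower]
    cases hscanH : pvScan (PySem.Str.lower s).toList HIGH_PRIORITY_CATEGORY_PATTERNS
        (List.range (PySem.Str.lower s).toList.length) with
    | some c =>
      rw [hscanH] at hH
      obtain ⟨x0, hx0, hx0c⟩ := Option.map_eq_some_iff.1 hH
      have hMne : pvAM (PySem.Str.lower s).toList HIGH_PRIORITY_CATEGORY_PATTERNS ≠ [] := by
        intro h0
        rw [h0] at hx0
        simp [PySem.List.sorted] at hx0
      obtain ⟨tl, htl⟩ := List.head?_eq_some_iff.mp hx0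
      rw [if_pos hMne, htl]
      simp [hx0c]
    | none =>
      rw [hscanH] at hH
      have hAM0 : pvAM (PySem.Str.lower s).toList HIGH_PRIORITY_CATEGORY_PATTERNS = [] := by
        have h1 := Option.map_eq_none_iff.1 hH
        have h2 := List.head?_eq_none_iff.1 h1
        exact (PySem.List.sorted_eq_nil_iff _ _ _).1 h2
      rw [if_neg (not_not_intro hAM0), hAM0, List.nil_append]
      cases hscanL : pvScan (PySem.Str.lower s).toList LOW_PRIORITY_CATEGORY_PATTERNS
          (List.range (PySem.Str.lower s).toList.length) with
      | some c =>
        rw [hscanL] at hL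
        obtain ⟨x0, hx0, hx0c⟩ := Option.map_eq_some_iff.1 hL
        have hMne : pvAM (PySem.Str.lower s).toList LOW_PRIORITY_CATEGORY_PATTERNS ≠ [] := by
          intro h0
          rw [h0] at hx0
          simp [PySem.List.sorted] at hx0
        obtain ⟨tl, htl⟩ := List.head?_eq_some_iff.mp hx0
        rw [if_pos hMne, htl]
        simp [hx0c]
      | none =>
        rw [hscanL] at hL
        have hAM0' : pvAM (PySem.Str.lower s).toList LOW_PRIORITY_CATEGORY_PATTERNS = [] := by
          have h1 := Option.map_eq_none_iff.1 hL
          have h2 := List.head?_eq_none_iff.1 h1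
          exact (PySem.List.sorted_eq_nil_iff _ _ _).1 h2
        rw [if_neg (not_not_intro hAM0')]

-- ===== VERDICT (by name: the statement is the Claim_ definition above) =====
theorem categorize_threat_spec : Claim_equal_categorize_threat := by
  intro s _
  unfold Spec_categorize_threat
  exact pvMain s
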